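-- pv_equiv track=rewrite | github.com/derekgliwa/adventofcode2023 | dec9/part2.py | build_next_rows
-- ===== SOURCE A (Python) =====
-- def build_next_rows(report_row):
--   next_row = []
--   for i in range(len(report_row) - 1):
--     next_row.append(report_row[i + 1] - report_row[i])
--   if all([x == 0 for x in next_row]):
--     return [next_row]
--   else:
--     return  [next_row] + build_next_rows(next_row)
-- ===== SOURCE B (Python) =====
-- def build_next_rows(report_row):
--     rows = []
--     current = report_row
--     while True:
--         nxt = [b - a for a, b in zip(current, current[1:])]
--         rows.append(nxt)
--         if all(x == 0 for x in nxt):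
--             return rows
--         current = nxt
-- ===== Notes on version B (the rewrite author's own statement) =====
-- stated objective: alternative
-- what changed: Replaces the recursion over difference rows with an explicit accumulation loop, and builds each difference row by zipping the row with its tail instead of indexing over range(len-1).
import Mathlib
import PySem

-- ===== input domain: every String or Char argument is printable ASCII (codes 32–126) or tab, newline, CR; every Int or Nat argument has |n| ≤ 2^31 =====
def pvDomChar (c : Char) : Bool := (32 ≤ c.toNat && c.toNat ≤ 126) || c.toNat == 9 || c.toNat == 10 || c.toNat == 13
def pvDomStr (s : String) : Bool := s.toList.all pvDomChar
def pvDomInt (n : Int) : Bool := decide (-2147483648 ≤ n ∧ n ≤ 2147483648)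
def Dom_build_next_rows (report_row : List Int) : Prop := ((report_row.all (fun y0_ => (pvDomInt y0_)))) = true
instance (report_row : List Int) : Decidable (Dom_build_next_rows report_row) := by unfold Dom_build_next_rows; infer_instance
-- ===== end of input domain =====

-- B replaces A's recursion over difference rows by an explicit accumulation loop
-- and computes each difference row by zipping the row with its tail (alternative; same cost).

-- ===== PORT A =====
-- next_row = []; for i in range(len(report_row) - 1): next_row.append(report_row[i+1] - report_row[i])
def pvNextRowA (report_row : List Int) : List Int :=
  (PySem.List.pyRange 0 ((report_row.length : Int) - 1) 1).foldl
    (fun acc i => acc ++ [PySem.List.pyGetD report_row (i + 1) 0 - PySem.List.pyGetD report_row i 0]) []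

theorem pvNextRowA_length (l : List Int) :
    (pvNextRowA l).length = ((l.length : Int) - 1).toNat := by
  unfold pvNextRowA
  rw [PySem.List.foldl_append_singleton_eq_map]
  simp [PySem.List.length_pyRange_one]

def build_next_rows (report_row : List Int) : List (List Int) :=
  if (pvNextRowA report_row).all (fun x => x == 0) then [pvNextRowA report_row]
  else [pvNextRowA report_row] ++ build_next_rows (pvNextRowA report_row)
termination_by report_row.length
decreasing_by
  rename_i h
  have hlen := pvNextRowA_length report_row
  have hne : pvNextRowA report_row ≠ [] := by
    intro hnil; rw [hnil] at h; simp at h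
  have hpos : 0 < (pvNextRowA report_row).length := List.length_pos_iff.mpr hne
  omega

-- ===== PORT B =====
-- nxt = [b - a for a, b in zip(current, current[1:])]
def pvNextRowB (l : List Int) : List Int :=
  List.zipWith (fun a b => b - a) l l.tail

theorem pvNextRowB_length (l : List Int) :
    (pvNextRowB l).length = l.length - 1 := by
  simp [pvNextRowB]

-- the while-True loop: rows is the accumulator, current the row being differenced
def pvBuildLoop (current : List Int) (rows : List (List Int)) : List (List Int) :=
  if (pvNextRowB current).all (fun x => x == 0) then rows ++ [pvNextRowB current]
  else pvBuildLoop (pvNextRowB current) (rows ++ [pvNextRowB current])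
termination_by current.length
decreasing_by
  rename_i h
  have hlen := pvNextRowB_length current
  have hne : pvNextRowB current ≠ [] := by
    intro hnil; rw [hnil] at h; simp at h
  have hpos : 0 < (pvNextRowB current).length := List.length_pos_iff.mpr hne
  omega

def build_next_rows_alt (report_row : List Int) : List (List Int) :=
  pvBuildLoop report_row []

-- ===== PRECONDITION & SPEC =====
def Spec_build_next_rows (report_row : List Int) (out : List (List Int)) : Prop := out = build_next_rows_alt report_row
instance (report_row : List Int) (out : List (List Int)) : Decidable (Spec_build_next_rows report_row out) := by unfold Spec_build_next_rows; infer_instance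

-- ===== CLAIM (what is proved, stated in full; the proofs are below) =====
def Claim_equal_build_next_rows : Prop := ∀ (report_row : List Int), Dom_build_next_rows report_row → Spec_build_next_rows report_row (build_next_rows report_row)

-- ===== LEMMAS AND PROOFS =====

-- the two ways of forming the difference row agree
theorem pvNextRow_eq (l : List Int) : pvNextRowA l = pvNextRowB l := by
  apply List.ext_getElem
  · have := pvNextRowA_length l
    have := pvNextRowB_length l
    omega
  · intro i h1 h2
    have hi : i < l.length - 1 := by
      have := pvNextRowA_length l; omega
    have hi1 : i + 1 < l.length := by omega
    have hi0 : i < l.length := by omega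
    have hit : i < l.tail.length := by simp [List.length_tail]; omega
    have hrange : i < ((l.length : Int) - 1 - 0).toNat := by omega
    simp only [pvNextRowA, PySem.List.foldl_append_singleton_eq_map, List.nil_append,
      PySem.List.pyRange_one]
    rw [List.getElem_map, List.getElem_map, List.getElem_range]
    simp only [pvNextRowB, List.getElem_zipWith, List.getElem_tail]
    have h1' : PySem.List.pyGetD l ((0 : Int) + i + 1) 0 = l[i + 1] := by
      have he : (0 : Int) + i + 1 = ((i + 1 : Nat) : Int) := by omega
      rw [he, PySem.List.pyGetD_natCast, List.getD_eq_getElem _ _ hi1]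
    have h0' : PySem.List.pyGetD l ((0 : Int) + i) 0 = l[i] := by
      have he : (0 : Int) + i = ((i : Nat) : Int) := by omega
      rw [he, PySem.List.pyGetD_natCast, List.getD_eq_getElem _ _ hi0]
    rw [h1', h0']

-- the loop with accumulator `rows` computes `rows ++` A's recursion
theorem pvBuildLoop_eq (current : List Int) (rows : List (List Int)) :
    pvBuildLoop current rows = rows ++ build_next_rows current := by
  induction current, rows using pvBuildLoop.induct with
  | case1 current rows h =>
      rw [pvBuildLoop, build_next_rows, pvNextRow_eq]
      rw [if_pos h, if_pos h]
  | case2 current rows h ih =>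
      rw [pvBuildLoop, build_next_rows, pvNextRow_eq]
      rw [if_neg h, if_neg h, ih]
      simp

-- ===== VERDICT (by name: the statement is the Claim_ definition above) =====
theorem build_next_rows_spec : Claim_equal_build_next_rows := by
  intro report_row _
  unfold Spec_build_next_rows build_next_rows_alt
  rw [pvBuildLoop_eq]
  simp
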